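-- pv_equiv track=rewrite | github.com/Xrenya/Algorithms | Other/metrics_union.py | metrics_prefix_non_optimal
-- ===== SOURCE A (Python) =====
-- def metrics_prefix_non_optimal(a, b):
--     # Complexity O(n**2)
--     output = []
--     for i in range(len(a)):
--         left_set = set(a[:i + 1])
--         right_set = set()
--         count = 0
--         for j in range(i, len(b)):
--             if b[j] in left_set and b[j] not in right_set:
--                 count += 1
--             right_set.add(b[j])
--         output.append(count)
--     return output
-- ===== SOURCE B (Python) =====
-- def metrics_prefix_non_optimal(a, b):
--     # One pass: occurrence counts of the remaining window of b plus a growing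
--     # prefix set of a; the intersection size is updated incrementally. O(n+m).
--     out = []
--     cnt = {}
--     for v in b:
--         cnt[v] = cnt.get(v, 0) + 1
--     left = set()
--     count = 0
--     for i, x in enumerate(a):
--         if x not in left:
--             left.add(x)
--             if cnt.get(x, 0) > 0:
--                 count += 1
--         out.append(count)
--         if i < len(b):
--             v = b[i]
--             cnt[v] = cnt[v] - 1
--             if cnt[v] == 0 and v in left:
--                 count -= 1
--     return out
-- ===== Notes on version B (the rewrite author's own statement) =====
-- stated objective: faster
-- what changed: A rebuilds set(a[:i+1]) and rescans b[i:] with a fresh seen-set for every index i (quadratic); B makes one pass, keeping an occurrence-count dict of the shrinking window b[i:] and a growing prefix set of a, updating the distinct-intersection count incrementally on each add/remove.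
import Mathlib
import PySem

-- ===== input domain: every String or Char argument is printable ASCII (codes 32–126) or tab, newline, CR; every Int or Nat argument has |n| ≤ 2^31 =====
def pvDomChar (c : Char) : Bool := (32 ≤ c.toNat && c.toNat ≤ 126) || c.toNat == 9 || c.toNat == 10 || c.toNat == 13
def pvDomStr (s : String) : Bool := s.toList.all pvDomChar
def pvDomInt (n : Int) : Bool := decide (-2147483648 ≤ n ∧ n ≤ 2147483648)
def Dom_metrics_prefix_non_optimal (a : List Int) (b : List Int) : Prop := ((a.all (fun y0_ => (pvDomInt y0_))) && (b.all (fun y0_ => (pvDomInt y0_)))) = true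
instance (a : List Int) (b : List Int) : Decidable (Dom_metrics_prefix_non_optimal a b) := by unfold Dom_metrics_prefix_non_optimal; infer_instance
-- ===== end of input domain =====

-- B replaces A's quadratic rescan (a fresh prefix set and a full scan of b[i:] for every i) by a
-- single incremental pass with an occurrence-count dict for the shrinking window b[i:]; same output.

-- ===== PORT A =====
def metrics_prefix_non_optimal (a : List Int) (b : List Int) : List Int :=
  (PySem.List.pyRange 0 (PySem.List.len a)).foldl (fun output i =>
    let left_set : PySem.Set Int := PySem.Set.ofList (PySem.List.slice a none (some (i + 1)))
    let inner :=
      (PySem.List.pyRange i (PySem.List.len b)).foldl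
        (fun (st : Int × PySem.Set Int) j =>
          let bj := PySem.List.pyGetD b j 0
          (if left_set.contains bj && !(PySem.Set.contains st.2 bj) then st.1 + 1 else st.1,
           PySem.Set.add st.2 bj))
        (0, PySem.Set.empty)
    output ++ [inner.1]) []

-- ===== PORT B =====
-- loop body of B: state = (output, counts of the remaining window of b, prefix set of a, count)
def pvBStep (b : List Int) (st : List Int × PySem.Dict Int Int × PySem.Set Int × Int)
    (p : Int × Int) : List Int × PySem.Dict Int Int × PySem.Set Int × Int :=
  let lc : PySem.Set Int × Int :=
    if PySem.Set.contains st.2.2.1 p.2 then (st.2.2.1, st.2.2.2)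
    else (PySem.Set.add st.2.2.1 p.2, if st.2.1.getD p.2 0 > 0 then st.2.2.2 + 1 else st.2.2.2)
  let out := st.1 ++ [lc.2]
  if p.1 < PySem.List.len b then
    let v := PySem.List.pyGetD b p.1 0
    let cnt := st.2.1.insert v (st.2.1.getD v 0 - 1)
    let count := if cnt.getD v 0 == 0 && PySem.Set.contains lc.1 v then lc.2 - 1 else lc.2
    (out, cnt, lc.1, count)
  else (out, st.2.1, lc.1, lc.2)

def metrics_prefix_non_optimal_alt (a : List Int) (b : List Int) : List Int :=
  let cnt0 : PySem.Dict Int Int := b.foldl (fun d v => d.insert v (d.getD v 0 + 1)) PySem.Dict.empty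
  ((PySem.List.enumerate a 0).foldl (pvBStep b) ([], cnt0, PySem.Set.empty, 0)).1

-- ===== PRECONDITION & SPEC =====
def Spec_metrics_prefix_non_optimal (a : List Int) (b : List Int) (out : List Int) : Prop := out = metrics_prefix_non_optimal_alt a b
instance (a : List Int) (b : List Int) (out : List Int) : Decidable (Spec_metrics_prefix_non_optimal a b out) := by unfold Spec_metrics_prefix_non_optimal; infer_instance

-- ===== CLAIM (what is proved, stated in full; the proofs are below) =====
def Claim_equal_metrics_prefix_non_optimal : Prop := ∀ (a : List Int) (b : List Int), Dom_metrics_prefix_non_optimal a b → Spec_metrics_prefix_non_optimal a b (metrics_prefix_non_optimal a b)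

-- ===== LEMMAS AND PROOFS =====

-- the common specification: entry i is the number of distinct values of b[i:] that occur in a[:i+1]
def pvSpecCount (a b : List Int) (k : Nat) : Int :=
  (((PySem.Set.ofList (b.drop k)).countP
      (fun v => PySem.Set.contains (PySem.Set.ofList (a.take (k + 1))) v) : Nat) : Int)

theorem pv_countP_add (s : PySem.Set Int) (x : Int) (p : Int → Bool) :
    (((PySem.Set.add s x).countP p : Nat) : Int)
      = ((s.countP p : Nat) : Int) + (if p x && !(PySem.Set.contains s x) then 1 else 0) := by
  by_cases h : x ∈ s
  · simp [PySem.Set.add, PySem.Set.contains, h]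
  · simp [PySem.Set.add, PySem.Set.contains, h, List.countP_append, List.countP_cons]

theorem pv_nodup_add (s : PySem.Set Int) (x : Int) (h : s.Nodup) : (PySem.Set.add s x).Nodup := by
  by_cases hm : x ∈ s
  · simpa [PySem.Set.add, PySem.Set.contains, hm]
  · simp [PySem.Set.add, PySem.Set.contains, hm, List.nodup_append, h]
    exact fun a ha heq => hm (heq ▸ ha)

theorem pv_countP_ofList_cons (v : Int) (T : List Int) (p : Int → Bool) :
    ((PySem.Set.ofList (v :: T)).countP p : Int)
      = ((PySem.Set.ofList T).countP p : Int) + (if p v && decide (v ∉ T) then 1 else 0) := by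
  have hperm : (PySem.Set.ofList (v :: T)).Perm (PySem.Set.add (PySem.Set.ofList T) v) := by
    apply (List.perm_ext_iff_of_nodup (PySem.Set.nodup_ofList _)
      (pv_nodup_add _ _ (PySem.Set.nodup_ofList _))).mpr
    intro y
    simp [PySem.Set.mem_ofList, PySem.Set.mem_add, List.mem_cons]
    tauto
  rw [hperm.countP_eq, pv_countP_add]
  have hco : PySem.Set.contains (PySem.Set.ofList T) v = decide (v ∈ T) := by
    simp [PySem.Set.contains, PySem.Set.mem_ofList]
  rw [hco]
  by_cases hv : v ∈ T <;> simp [hv]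

theorem pv_countP_contains_append (S : List Int) (hS : S.Nodup) (L : List Int) (x : Int) (hx : x ∉ L) :
    (S.countP (fun v => PySem.Set.contains (L ++ [x]) v) : Int)
      = (S.countP (fun v => PySem.Set.contains L v) : Int) + (if x ∈ S then 1 else 0) := by
  induction S with
  | nil => simp
  | cons y t ih =>
    rcases List.nodup_cons.mp hS with ⟨hy, ht⟩
    have ihh := ih ht
    rw [List.countP_cons, List.countP_cons]
    by_cases hxy : y = x
    · subst hxy
      have h1 : PySem.Set.contains (L ++ [y]) y = true := by
        simp [PySem.Set.contains]
      have h2 : PySem.Set.contains L y = false := by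
        simp [PySem.Set.contains, hx]
      push_cast [ihh, h1, h2, hy]
      simp [hy]
    · have h1 : PySem.Set.contains (L ++ [x]) y = PySem.Set.contains L y := by
        simp [PySem.Set.contains, hxy]
      have h2 : (x ∈ y :: t) ↔ (x ∈ t) := by
        simp only [List.mem_cons, or_iff_right_iff_imp]
        exact fun hh => absurd hh.symm hxy
      rw [h1]
      push_cast [ihh]
      by_cases hxt : x ∈ t <;> simp [hxt, h2] <;> omega

theorem pvA_inner (L : PySem.Set Int) (l : List Int) :
    ∀ (c : Int) (seen : PySem.Set Int),
    (l.foldl (fun (st : Int × PySem.Set Int) v =>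
        (if L.contains v && !(PySem.Set.contains st.2 v) then st.1 + 1 else st.1,
         PySem.Set.add st.2 v)) (c, seen)).1
      = c + ((PySem.Set.update seen l).countP L.contains : Int)
          - ((seen.countP L.contains : Nat) : Int) := by
  induction l with
  | nil => intro c seen; simp [PySem.Set.update]
  | cons v t ih =>
    intro c seen
    simp only [List.foldl_cons]
    rw [ih]
    have hupd : PySem.Set.update seen (v :: t) = PySem.Set.update (PySem.Set.add seen v) t := rfl
    rw [hupd, pv_countP_add seen v L.contains]
    by_cases h : (L.contains v && !(PySem.Set.contains seen v)) = true
    · rw [if_pos h, if_pos h]; omega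
    · rw [if_neg h, if_neg h]; omega

theorem pvA_eq (a b : List Int) :
    metrics_prefix_non_optimal a b = (List.range a.length).map (pvSpecCount a b) := by
  unfold metrics_prefix_non_optimal
  simp only [PySem.List.len_eq, PySem.List.pyRange_zero_nat, List.foldl_map,
    PySem.List.foldl_append_singleton_eq_map, List.nil_append]
  apply List.map_congr_left
  intro k _
  have hsl : PySem.List.slice a none (some ((k : Int) + 1)) = a.take (k + 1) := by
    have h1 : ((k : Int) + 1) = ((k + 1 : Nat) : Int) := by push_cast; ring
    rw [h1, PySem.List.slice_to_natCast]
  simp only [hsl]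
  rw [PySem.List.foldl_pyRange_pyGetD' b 0
    (fun (st : Int × PySem.Set Int) v =>
      (if (PySem.Set.ofList (a.take (k+1))).contains v && !(PySem.Set.contains st.2 v)
       then st.1 + 1 else st.1, PySem.Set.add st.2 v))
    (0, PySem.Set.empty) (Int.natCast_nonneg k)]
  rw [pvA_inner]
  simp [pvSpecCount, PySem.Set.empty, PySem.Set.update, PySem.Set.ofList_eq_foldl]
  apply List.countP_congr
  intro v _
  simp [List.contains_iff_mem]

theorem pvB_loop (b : List Int) :
    ∀ (rest pre out : List Int) (cnt : PySem.Dict Int Int) (count : Int),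
    (∀ v : Int, cnt.getD v 0 = (((b.drop pre.length).count v : Nat) : Int)) →
    count = (((PySem.Set.ofList (b.drop pre.length)).countP
        (fun v => PySem.Set.contains (PySem.Set.ofList pre) v) : Nat) : Int) →
    ((PySem.List.enumerate rest (pre.length : Int)).foldl (pvBStep b)
        (out, cnt, PySem.Set.ofList pre, count)).1
      = out ++ (List.range' pre.length rest.length).map (pvSpecCount (pre ++ rest) b) := by
  intro rest
  induction rest with
  | nil => intro pre out cnt count _ _; simp [PySem.List.enumerate]
  | cons x t ih =>
    intro pre out cnt count H1 H2
    rw [PySem.List.enumerate_cons, List.foldl_cons]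
    -- abbreviations
    set i := pre.length with hi
    -- the new prefix set
    have hofl : PySem.Set.ofList (pre ++ [x]) = PySem.Set.add (PySem.Set.ofList pre) x := by
      rw [PySem.Set.ofList_eq_foldl, PySem.Set.ofList_eq_foldl, List.foldl_append]
      rfl
    have hcontains : ∀ (s : List Int) (w : Int), PySem.Set.contains s w = decide (w ∈ s) := by
      intro s w; simp [PySem.Set.contains, List.contains_iff_mem]
    -- the count after the prefix update
    have hcount1 :
        (if PySem.Set.contains (PySem.Set.ofList pre) x
         then ((PySem.Set.ofList pre, count) : PySem.Set Int × Int)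
         else (PySem.Set.add (PySem.Set.ofList pre) x,
               if cnt.getD x 0 > 0 then count + 1 else count))
        = (PySem.Set.ofList (pre ++ [x]),
           (((PySem.Set.ofList (b.drop i)).countP
              (fun v => PySem.Set.contains (PySem.Set.ofList (pre ++ [x])) v) : Nat) : Int)) := by
      by_cases hx : x ∈ pre
      · have hc : PySem.Set.contains (PySem.Set.ofList pre) x = true := by
          simp [hcontains, PySem.Set.mem_ofList]
          exact hx
        have heq : PySem.Set.ofList (pre ++ [x]) = PySem.Set.ofList pre := by
          rw [hofl, PySem.Set.add, if_pos hc]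
        rw [heq, if_pos hc, H2]
      · have hc : PySem.Set.contains (PySem.Set.ofList pre) x = false := by
          simp [hcontains, PySem.Set.mem_ofList]
          exact hx
        have hxnot : x ∉ PySem.Set.ofList pre := by
          rw [PySem.Set.mem_ofList]; exact hx
        have hadd : PySem.Set.ofList pre ++ [x] = PySem.Set.add (PySem.Set.ofList pre) x := by
          rw [PySem.Set.add, hc]; simp
        have happ := pv_countP_contains_append (PySem.Set.ofList (b.drop i))
          (PySem.Set.nodup_ofList _) (PySem.Set.ofList pre) x hxnot
        rw [if_neg (by rw [hc]; simp)]
        rw [hofl]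
        have hmem : (x ∈ PySem.Set.ofList (b.drop i)) ↔ x ∈ b.drop i := PySem.Set.mem_ofList _ _
        have hcnt : cnt.getD x 0 > 0 ↔ x ∈ b.drop i := by
          rw [H1 x]
          constructor
          · intro hgt
            have : 0 < (b.drop i).count x := by exact_mod_cast hgt
            exact List.count_pos_iff.mp this
          · intro hmm
            have : 0 < (b.drop i).count x := List.count_pos_iff.mpr hmm
            exact_mod_cast this
        have hpred : (fun v => PySem.Set.contains (PySem.Set.add (PySem.Set.ofList pre) x) v)
            = (fun v => PySem.Set.contains (PySem.Set.ofList pre ++ [x]) v) := by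
          rw [hadd]
        rw [hpred]
        refine Prod.ext rfl ?_
        simp only []
        rw [happ]
        by_cases hbx : x ∈ b.drop i
        · rw [if_pos (hcnt.mpr hbx), if_pos (hmem.mpr hbx)]
          omega
        · rw [if_neg (fun hh => hbx (hcnt.mp hh)), if_neg (fun hh => hbx (hmem.mp hh))]
          omega
    -- the first appended entry is the spec value at index i
    have htake : (pre ++ x :: t).take (i + 1) = pre ++ [x] := by
      simp [hi, List.take_append]
    have hspec : pvSpecCount (pre ++ x :: t) b i
        = (((PySem.Set.ofList (b.drop i)).countP
            (fun v => PySem.Set.contains (PySem.Set.ofList (pre ++ [x])) v) : Nat) : Int) := by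
      unfold pvSpecCount
      rw [htake]
    have hlen1 : ((pre ++ [x]).length : Int) = (i : Int) + 1 := by
      simp [hi]
    by_cases hib : ((i : Nat) : Int) < PySem.List.len b
    · have hlt : i < b.length := by
        have := hib
        rw [PySem.List.len_eq] at this
        exact_mod_cast this
      have hv : PySem.List.pyGetD b ((i : Nat) : Int) 0 = b[i] := by
        rw [PySem.List.pyGetD_natCast]
        exact List.getD_eq_getElem b 0 hlt
      have hdropi : b.drop i = b[i] :: b.drop (i + 1) := List.drop_eq_getElem_cons hlt
      have hstep : pvBStep b (out, cnt, PySem.Set.ofList pre, count) (((i : Nat) : Int), x)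
          = (out ++ [(((PySem.Set.ofList (b.drop i)).countP
                (fun v => PySem.Set.contains (PySem.Set.ofList (pre ++ [x])) v) : Nat) : Int)],
             cnt.insert (b[i]) (cnt.getD (b[i]) 0 - 1),
             PySem.Set.ofList (pre ++ [x]),
             if (cnt.insert (b[i]) (cnt.getD (b[i]) 0 - 1)).getD (b[i]) 0 == 0
                && PySem.Set.contains (PySem.Set.ofList (pre ++ [x])) (b[i])
             then (((PySem.Set.ofList (b.drop i)).countP
                (fun v => PySem.Set.contains (PySem.Set.ofList (pre ++ [x])) v) : Nat) : Int) - 1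
             else (((PySem.Set.ofList (b.drop i)).countP
                (fun v => PySem.Set.contains (PySem.Set.ofList (pre ++ [x])) v) : Nat) : Int)) := by
        simp only [pvBStep]
        rw [hcount1, if_pos hib, hv]
      rw [hstep]
      have H1' : ∀ w : Int, (cnt.insert (b[i]) (cnt.getD (b[i]) 0 - 1)).getD w 0
          = (((b.drop ((pre ++ [x]).length)).count w : Nat) : Int) := by
        intro w
        have hlen2 : (pre ++ [x]).length = i + 1 := by simp [hi]
        rw [hlen2, PySem.Dict.getD_insert]
        by_cases hw : w = b[i]
        · rw [if_pos hw, hw, H1 (b[i]), hdropi, List.count_cons]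
          simp
        · rw [if_neg hw, H1 w, hdropi, List.count_cons]
          have hwb : (b[i] == w) = false := beq_eq_false_iff_ne.mpr (fun hh => hw hh.symm)
          rw [hwb]
          simp only [Bool.false_eq_true, if_false, add_zero]
      have H2' : (if (cnt.insert (b[i]) (cnt.getD (b[i]) 0 - 1)).getD (b[i]) 0 == 0
                && PySem.Set.contains (PySem.Set.ofList (pre ++ [x])) (b[i])
             then (((PySem.Set.ofList (b.drop i)).countP
                (fun v => PySem.Set.contains (PySem.Set.ofList (pre ++ [x])) v) : Nat) : Int) - 1
             else (((PySem.Set.ofList (b.drop i)).countP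
                (fun v => PySem.Set.contains (PySem.Set.ofList (pre ++ [x])) v) : Nat) : Int))
          = (((PySem.Set.ofList (b.drop ((pre ++ [x]).length))).countP
              (fun v => PySem.Set.contains (PySem.Set.ofList (pre ++ [x])) v) : Nat) : Int) := by
        have hlen2 : (pre ++ [x]).length = i + 1 := by simp [hi]
        have hcons := pv_countP_ofList_cons (b[i]) (b.drop (i + 1))
          (fun v => PySem.Set.contains (PySem.Set.ofList (pre ++ [x])) v)
        rw [hlen2, H1' (b[i]), hlen2]
        rw [hdropi, hcons]
        by_cases hvt : b[i] ∈ b.drop (i + 1)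
        · have h0 : 0 < (b.drop (i + 1)).count (b[i]) := List.count_pos_iff.mpr hvt
          have hz : ((((b.drop (i + 1)).count (b[i]) : Nat) : Int) == 0) = false := by
            simp only [beq_eq_false_iff_ne, ne_eq]
            intro hh
            omega
          simp only [hz, Bool.false_and, Bool.false_eq_true, if_false]
          simp [hvt]
        · have hz : ((((b.drop (i + 1)).count (b[i]) : Nat) : Int) == 0) = true := by
            have hc0 : (b.drop (i + 1)).count (b[i]) = 0 := List.count_eq_zero.mpr hvt
            simp [hc0]
          simp only [hz, Bool.true_and]
          by_cases hpv : b[i] ∈ pre ∨ b[i] = x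
          · have hpc : PySem.Set.contains (PySem.Set.ofList (pre ++ [x])) (b[i]) = true := by
              rw [hcontains]
              simp only [PySem.Set.mem_ofList, decide_eq_true_eq, List.mem_append,
                List.mem_singleton]
              exact hpv
            simp only [hpc, if_true]
            simp [hpc, hvt]
          · have hpc : PySem.Set.contains (PySem.Set.ofList (pre ++ [x])) (b[i]) = false := by
              rw [hcontains]
              simp only [PySem.Set.mem_ofList, decide_eq_false_iff_not, List.mem_append,
                List.mem_singleton]
              exact hpv
            simp only [hpc, Bool.false_eq_true, if_false]
            simp [hpc, hvt]
      have hih := ih (pre ++ [x]) (out ++ [(((PySem.Set.ofList (b.drop i)).countP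
                (fun v => PySem.Set.contains (PySem.Set.ofList (pre ++ [x])) v) : Nat) : Int)])
        (cnt.insert (b[i]) (cnt.getD (b[i]) 0 - 1)) _ H1' H2'
      rw [hlen1] at hih
      rw [hih]
      have hlen2 : (pre ++ [x]).length = i + 1 := by simp [hi]
      rw [hlen2, List.length_cons, List.range'_succ, List.map_cons, ← hspec]
      simp [List.append_assoc]
    · have hge : b.length ≤ i := by
        rw [PySem.List.len_eq] at hib
        omega
      have hdropnil : b.drop i = ([] : List Int) := List.drop_eq_nil_of_le hge
      have hdropnil1 : b.drop (i + 1) = ([] : List Int) := List.drop_eq_nil_of_le (by omega)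
      have hstep : pvBStep b (out, cnt, PySem.Set.ofList pre, count) (((i : Nat) : Int), x)
          = (out ++ [(((PySem.Set.ofList (b.drop i)).countP
                (fun v => PySem.Set.contains (PySem.Set.ofList (pre ++ [x])) v) : Nat) : Int)],
             cnt,
             PySem.Set.ofList (pre ++ [x]),
             (((PySem.Set.ofList (b.drop i)).countP
                (fun v => PySem.Set.contains (PySem.Set.ofList (pre ++ [x])) v) : Nat) : Int)) := by
        simp only [pvBStep]
        rw [hcount1, if_neg hib]
      rw [hstep]
      have H1' : ∀ w : Int, cnt.getD w 0 = (((b.drop ((pre ++ [x]).length)).count w : Nat) : Int) := by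
        intro w
        have hlen2 : (pre ++ [x]).length = i + 1 := by simp [hi]
        rw [hlen2, hdropnil1, H1 w, hdropnil]
      have H2' : (((PySem.Set.ofList (b.drop i)).countP
              (fun v => PySem.Set.contains (PySem.Set.ofList (pre ++ [x])) v) : Nat) : Int)
          = (((PySem.Set.ofList (b.drop ((pre ++ [x]).length))).countP
              (fun v => PySem.Set.contains (PySem.Set.ofList (pre ++ [x])) v) : Nat) : Int) := by
        have hlen2 : (pre ++ [x]).length = i + 1 := by simp [hi]
        rw [hlen2, hdropnil, hdropnil1]
      have hih := ih (pre ++ [x]) (out ++ [(((PySem.Set.ofList (b.drop i)).countP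
                (fun v => PySem.Set.contains (PySem.Set.ofList (pre ++ [x])) v) : Nat) : Int)])
        cnt _ H1' H2'
      rw [hlen1] at hih
      rw [hih]
      have hlen2' : (pre ++ [x]).length = i + 1 := by simp [hi]
      rw [hlen2', List.length_cons, List.range'_succ, List.map_cons, ← hspec]
      simp [List.append_assoc]

theorem pvB_eq (a b : List Int) :
    metrics_prefix_non_optimal_alt a b = (List.range a.length).map (pvSpecCount a b) := by
  unfold metrics_prefix_non_optimal_alt
  have h := pvB_loop b a [] []
    (b.foldl (fun d v => d.insert v (d.getD v 0 + 1)) PySem.Dict.empty) 0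
    (fun v => by simpa using PySem.Dict.getD_foldl_insert_add_one b PySem.Dict.empty v)
    (by simp [PySem.Set.ofList, PySem.Set.contains])
  simp only [List.length_nil, Nat.cast_zero, List.nil_append] at h
  rw [List.range_eq_range']
  simpa [PySem.Set.ofList, PySem.Set.empty] using h

-- ===== VERDICT (by name: the statement is the Claim_ definition above) =====
theorem metrics_prefix_non_optimal_spec : Claim_equal_metrics_prefix_non_optimal := by
  intro a b _
  unfold Spec_metrics_prefix_non_optimal
  rw [pvA_eq, pvB_eq]
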